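-- pv_equiv track=rewrite | github.com/unswit/COMP9021_2 | quizes/quiz05/quiz_5.py | decode
-- ===== SOURCE A (Python) =====
-- from collections import deque
--
-- def decode(integer):
--     # 给定一个数字，转换成2进制
--     # list append(1),pop 1 尾端进行操作，2，3,1， 2，3，1 pop() 1
--     # deque 双向链表 append,append left
--     # 857310204
--     # 11001100   0      11  00  11  00  00  0  11   11  11  11  00
--     # 1010              10100                   11110
--
--     # 11110110001100001111110100110011110000
--     # 1111 0  11  0001100001111110100110011110000
--     number = bin(integer)[2:]
--
--     # check odd number of '1'
--     if number.count("1") % 2 == 1: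
--         return None
--
--     base_deque = deque(bin(integer)[2:])
--
--     line = ''
--     while len(base_deque) >= 2:
--         first = base_deque.popleft()
--         second = base_deque.popleft()
--         if first == second:
--             line += first
--         else:
--             line += ' '
--             base_deque.appendleft(second)
--
--     result = [int(n, 2) for n in line.split()]
--     # 返回结果
--     if len(base_deque) == 0 and result:
--         return result
--     else:
--         return None
-- ===== SOURCE B (Python) =====
-- def decode(integer):
--     # Single pass over the bit string: fold equal pairs into a running
--     # integer accumulator instead of building a space-delimited string
--     # and re-parsing it with split()/int(,2).
--     bits = bin(abs(integer))[2:]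
--     if bits.count('1') % 2 == 1:
--         return None
--     n = len(bits)
--     i = 0
--     cur = 0
--     have = False
--     result = []
--     while i + 1 < n:
--         if bits[i] == bits[i + 1]:
--             cur = cur * 2 + int(bits[i])
--             have = True
--             i += 2
--         else:
--             if have:
--                 result.append(cur)
--                 cur = 0
--                 have = False
--             i += 1
--     if have:
--         result.append(cur)
--     if i == n and result:
--         return result
--     return None
-- ===== Notes on version B (the rewrite author's own statement) =====
-- stated objective: simpler
-- what changed: Replaces A's deque-popping loop that builds a space-delimited string which is then re-parsed with split() and int(,2) by a single pass over the bit string that folds each equal pair directly into a running integer accumulator, flushing completed groups into the result list.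
import Mathlib
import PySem

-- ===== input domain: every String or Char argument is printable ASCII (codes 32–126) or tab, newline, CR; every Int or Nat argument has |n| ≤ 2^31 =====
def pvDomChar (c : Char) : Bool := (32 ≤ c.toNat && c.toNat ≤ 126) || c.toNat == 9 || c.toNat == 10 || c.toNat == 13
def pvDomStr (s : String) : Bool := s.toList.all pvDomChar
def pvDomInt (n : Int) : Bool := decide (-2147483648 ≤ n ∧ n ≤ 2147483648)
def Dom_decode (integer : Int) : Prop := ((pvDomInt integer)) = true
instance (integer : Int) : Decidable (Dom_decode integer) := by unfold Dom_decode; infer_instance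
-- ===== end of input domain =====

-- B replaces A's "build a space-delimited string, then split() and int(,2) each piece"
-- by a single pass over the bit string with a running integer accumulator (objective: simpler).

-- ===== PORT A =====
-- bin(m) for m ≥ 1, without the '0b' prefix (hand port, exact: MSB first)
def binBits : Nat → List Char
  | 0 => []
  | n + 1 => binBits ((n + 1) / 2) ++ [if (n + 1) % 2 == 1 then '1' else '0']
decreasing_by omega

-- bin(m)[2:] for m : Nat (bin(0)[2:] = "0")
def pyBinNat (m : Nat) : List Char := if m = 0 then ['0'] else binBits m

-- bin(integer)[2:]: for a negative argument Python's bin gives '-0b…', so [2:] keeps a 'b'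
def pyBin (n : Int) : List Char := if n < 0 then 'b' :: pyBinNat n.natAbs else pyBinNat n.natAbs

-- int(g, 2) (hand port; exact for the non-empty '0'/'1' strings split() produces here)
def int2 (g : List Char) : Int := g.foldl (fun a c => a * 2 + (if c == '1' then 1 else 0)) 0

-- the while-loop over the deque: returns (line, remaining deque)
def loopA : List Char → List Char → List Char × List Char
  | a :: b :: rest, line =>
    if a == b then loopA rest (line ++ [a])
    else loopA (b :: rest) (line ++ [' '])
  | dq, line => (line, dq)
termination_by dq _ => dq.length
decreasing_by all_goals simp

def decode (integer : Int) : Option (List Int) :=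
  let number := pyBin integer
  -- number.count("1") (str.count with a single-char needle = List.count, exact)
  if number.count '1' % 2 == 1 then none
  else
    let p := loopA (pyBin integer) []
    let result := (PySem.Chars.split₀ p.1).map int2
    if p.2.isEmpty && !result.isEmpty then some result else none

-- ===== PORT B =====
-- the single-pass while loop of Source B (index i ↔ the unread suffix of bits)
def scanB : List Char → Int → Bool → List Int → Option (List Int)
  | a :: b :: rest, cur, hv, res =>
    if a == b then scanB rest (cur * 2 + (if a == '1' then 1 else 0)) true res
    else scanB (b :: rest) 0 false (if hv then res ++ [cur] else res)
  | rest, cur, hv, res =>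
    let res' := if hv then res ++ [cur] else res
    if rest.isEmpty && !res'.isEmpty then some res' else none
termination_by l _ _ _ => l.length
decreasing_by all_goals simp

def decode_alt (integer : Int) : Option (List Int) :=
  let bits := pyBinNat integer.natAbs     -- bin(abs(integer))[2:]
  if bits.count '1' % 2 == 1 then none
  else scanB bits 0 false []

-- ===== PRECONDITION & SPEC =====
def Spec_decode (integer : Int) (out : Option (List Int)) : Prop := out = decode_alt integer
instance (integer : Int) (out : Option (List Int)) : Decidable (Spec_decode integer out) := by unfold Spec_decode; infer_instance

-- ===== CLAIM (what is proved, stated in full; the proofs are below) =====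
def Claim_equal_decode : Prop := ∀ (integer : Int), Dom_decode integer → Spec_decode integer (decode integer)

-- ===== LEMMAS AND PROOFS =====

-- proof-side mirror of loopA with empty accumulator: the line built, and the deque left over
def lineOf : List Char → List Char
  | a :: b :: rest => if a == b then a :: lineOf rest else ' ' :: lineOf (b :: rest)
  | _ => []
termination_by l => l.length
decreasing_by all_goals simp

def remOf : List Char → List Char
  | a :: b :: rest => if a == b then remOf rest else remOf (b :: rest)
  | dq => dq
termination_by l => l.length
decreasing_by all_goals simp

-- proof-side mirror of B's scan state: groups produced from a line suffix, given (cur, have)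
def groupsFrom : List Char → Int → Bool → List Int
  | [], cur, hv => if hv then [cur] else []
  | c :: l, cur, hv =>
    if c == ' ' then (if hv then [cur] else []) ++ groupsFrom l 0 false
    else groupsFrom l (cur * 2 + (if c == '1' then 1 else 0)) true

lemma loopA_eq (bs line : List Char) : loopA bs line = (line ++ lineOf bs, remOf bs) := by
  induction bs, line using loopA.induct with
  | case1 a b rest line h ih => simp_all [loopA, lineOf, remOf]
  | case2 a b rest line h ih => simp_all [loopA, lineOf, remOf]
  | case3 dq line h => cases dq with
    | nil => simp [loopA, lineOf, remOf]
    | cons x xs => cases xs with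
      | nil => simp [loopA, lineOf, remOf]
      | cons y ys => exact absurd rfl (h x y ys)

lemma binBits_mem (m : Nat) : ∀ c ∈ binBits m, c = '0' ∨ c = '1' := by
  induction m using binBits.induct with
  | case1 => simp [binBits]
  | case2 n ih =>
    intro c hc
    simp only [binBits, List.mem_append, List.mem_singleton] at hc
    rcases hc with h | h
    · exact ih c h
    · subst h; split <;> simp

lemma pyBinNat_mem (m : Nat) : ∀ c ∈ pyBinNat m, c = '0' ∨ c = '1' := by
  unfold pyBinNat; split
  · simp
  · exact binBits_mem m

lemma pyBinNat_ne_nil (m : Nat) : pyBinNat m ≠ [] := by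
  unfold pyBinNat; split
  · simp
  · rename_i h
    cases m with
    | zero => exact absurd rfl h
    | succ n => simp [binBits]

lemma lineOf_mem (bs : List Char) (hb : ∀ c ∈ bs, c = '0' ∨ c = '1') :
    ∀ c ∈ lineOf bs, c = '0' ∨ c = '1' ∨ c = ' ' := by
  induction bs using lineOf.induct with
  | case1 a b rest h ih =>
    intro c hc
    simp only [lineOf, h, if_true] at hc
    rcases List.mem_cons.mp hc with rfl | hc
    · rcases hb c (by simp) with h' | h' <;> simp [h']
    · exact ih (fun d hd => hb d (by simp [hd])) c hc
  | case2 a b rest h ih =>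
    intro c hc
    simp only [lineOf, h] at hc
    rcases List.mem_cons.mp hc with rfl | hc
    · simp
    · exact ih (fun d hd => hb d (by simp at hd ⊢; tauto)) c hc
  | case3 dq h =>
    cases dq with
    | nil => simp [lineOf]
    | cons x xs => cases xs with
      | nil => simp [lineOf]
      | cons y ys => exact absurd rfl (h x y ys)

lemma int2_append_one (g : List Char) (c : Char) :
    int2 (g ++ [c]) = int2 g * 2 + (if c == '1' then 1 else 0) := by
  simp [int2, List.foldl_append]

-- str.split() eats the current word state exactly like groupsFrom
lemma go_groups (l : List Char) : ∀ (cur : List Char) (acc : List (List Char)),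
    (∀ c ∈ l, c = '0' ∨ c = '1' ∨ c = ' ') →
    (PySem.Chars.split₀.go l cur acc).map int2
      = (acc.reverse.map int2) ++ groupsFrom l (int2 cur.reverse) (!cur.isEmpty) := by
  induction l with
  | nil =>
    intro cur acc _
    cases cur with
    | nil => simp [PySem.Chars.split₀.go, groupsFrom]
    | cons x xs => simp [PySem.Chars.split₀.go, groupsFrom]
  | cons c rest ih =>
    intro cur acc hl
    have hrest : ∀ c ∈ rest, c = '0' ∨ c = '1' ∨ c = ' ' := fun d hd => hl d (by simp [hd])
    rcases hl c (by simp) with rfl | rfl | rfl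
    · rw [show PySem.Chars.split₀.go ('0' :: rest) cur acc
          = PySem.Chars.split₀.go rest ('0' :: cur) acc by
        simp [PySem.Chars.split₀.go, show PySem.Chars.isspace '0' = false from by decide]]
      rw [ih ('0' :: cur) acc hrest]
      simp [groupsFrom, int2_append_one]
    · rw [show PySem.Chars.split₀.go ('1' :: rest) cur acc
          = PySem.Chars.split₀.go rest ('1' :: cur) acc by
        simp [PySem.Chars.split₀.go, show PySem.Chars.isspace '1' = false from by decide]]
      rw [ih ('1' :: cur) acc hrest]
      simp [groupsFrom, int2_append_one]
    · cases cur with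
      | nil =>
        rw [show PySem.Chars.split₀.go (' ' :: rest) [] acc
            = PySem.Chars.split₀.go rest [] acc by
          simp [PySem.Chars.split₀.go, show PySem.Chars.isspace ' ' = true from by decide]]
        rw [ih [] acc hrest]
        simp [groupsFrom, int2]
      | cons x xs =>
        rw [show PySem.Chars.split₀.go (' ' :: rest) (x :: xs) acc
            = PySem.Chars.split₀.go rest [] ((x :: xs).reverse :: acc) by
          simp [PySem.Chars.split₀.go, show PySem.Chars.isspace ' ' = true from by decide]]
        rw [ih [] ((x :: xs).reverse :: acc) hrest]
        simp [groupsFrom, int2]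

-- B's scan equals: flush through groupsFrom over the line A would have built
lemma scanB_eq (bs : List Char) (cur : Int) (hv : Bool) (res : List Int)
    (hb : ∀ c ∈ bs, c = '0' ∨ c = '1') :
    scanB bs cur hv res =
      (if (remOf bs).isEmpty && !(res ++ groupsFrom (lineOf bs) cur hv).isEmpty
       then some (res ++ groupsFrom (lineOf bs) cur hv) else none) := by
  revert hb
  induction bs, cur, hv, res using scanB.induct with
  | case1 a b rest cur hv res h ih =>
    intro hb
    simp only [dite_eq_ite] at ih
    have ha : (a == ' ') = false := by
      rcases hb a (by simp) with rfl | rfl <;> decide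
    rw [show scanB (a :: b :: rest) cur hv res
        = scanB rest (cur * 2 + (if a == '1' then 1 else 0)) true res by simp [scanB, h]]
    rw [ih (fun c hc => hb c (by simp [hc]))]
    simp [lineOf, remOf, h, groupsFrom, ha]
  | case2 a b rest cur hv res h ih =>
    intro hb
    simp only [dite_eq_ite] at ih
    rw [show scanB (a :: b :: rest) cur hv res
        = scanB (b :: rest) 0 false (if hv then res ++ [cur] else res) by simp [scanB, h]]
    rw [ih (fun c hc => hb c (by simp at hc ⊢; tauto))]
    simp only [lineOf, remOf, h]
    have harr : (if hv then res ++ [cur] else res) ++ groupsFrom (lineOf (b :: rest)) 0 false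
        = res ++ ((if hv then [cur] else []) ++ groupsFrom (lineOf (b :: rest)) 0 false) := by
      cases hv <;> simp
    rw [harr]
    cases hv <;> simp [groupsFrom]
  | case3 rest cur hv res h h2 =>
    intro _
    cases rest with
    | nil => simp only [scanB, lineOf, remOf, groupsFrom]; cases hv <;> simp
    | cons x xs => cases xs with
      | nil => simp only [scanB, lineOf, remOf, groupsFrom]; cases hv <;> simp
      | cons y ys => exact absurd rfl (h x y ys)
  | case4 rest cur hv res h h2 =>
    intro _
    cases rest with
    | nil => simp only [scanB, lineOf, remOf, groupsFrom]; cases hv <;> simp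
    | cons x xs => cases xs with
      | nil => simp only [scanB, lineOf, remOf, groupsFrom]; cases hv <;> simp
      | cons y ys => exact absurd rfl (h x y ys)

lemma split₀_space (l : List Char) :
    PySem.Chars.split₀ (' ' :: l) = PySem.Chars.split₀ l := by
  simp [PySem.Chars.split₀, PySem.Chars.split₀.go,
        show PySem.Chars.isspace ' ' = true from by decide]

-- A's whole pipeline after the parity guard equals B's scan
lemma decode_core (bs : List Char) (hb : ∀ c ∈ bs, c = '0' ∨ c = '1') :
    (if (loopA bs []).2.isEmpty
        && !((PySem.Chars.split₀ (loopA bs []).1).map int2).isEmpty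
     then some ((PySem.Chars.split₀ (loopA bs []).1).map int2) else none)
      = scanB bs 0 false [] := by
  have hsplit : (PySem.Chars.split₀ (lineOf bs)).map int2 = groupsFrom (lineOf bs) 0 false := by
    have := go_groups (lineOf bs) [] [] (lineOf_mem bs hb)
    simpa [PySem.Chars.split₀] using this
  rw [loopA_eq, scanB_eq bs 0 false [] hb]
  simp [hsplit]

-- same, for the 'b'-prefixed string bin(integer)[2:] of a negative integer
lemma decode_core_neg (bs : List Char) (hb : ∀ c ∈ bs, c = '0' ∨ c = '1') (hne : bs ≠ []) :
    (if (loopA ('b' :: bs) []).2.isEmpty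
        && !((PySem.Chars.split₀ (loopA ('b' :: bs) []).1).map int2).isEmpty
     then some ((PySem.Chars.split₀ (loopA ('b' :: bs) []).1).map int2) else none)
      = scanB bs 0 false [] := by
  obtain ⟨x, xs, rfl⟩ : ∃ x xs, bs = x :: xs := by
    cases bs with
    | nil => exact absurd rfl hne
    | cons x xs => exact ⟨x, xs, rfl⟩
  have hbx : ('b' == x) = false := by
    rcases hb x (by simp) with rfl | rfl <;> decide
  rw [show loopA ('b' :: x :: xs) [] = loopA (x :: xs) [' '] by simp [loopA, hbx]]
  have hsplit : (PySem.Chars.split₀ (lineOf (x :: xs))).map int2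
      = groupsFrom (lineOf (x :: xs)) 0 false := by
    have := go_groups (lineOf (x :: xs)) [] [] (lineOf_mem (x :: xs) hb)
    simpa [PySem.Chars.split₀] using this
  rw [loopA_eq, scanB_eq (x :: xs) 0 false [] hb]
  simp [split₀_space, hsplit]

-- ===== VERDICT (by name: the statement is the Claim_ definition above) =====
theorem decode_spec : Claim_equal_decode := by
  intro integer _
  show decode integer = decode_alt integer
  unfold decode decode_alt pyBin
  have hb := pyBinNat_mem integer.natAbs
  by_cases hneg : integer < 0
  · simp only [hneg, if_true]
    rw [show ('b' :: pyBinNat integer.natAbs).count '1' = (pyBinNat integer.natAbs).count '1'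
        from by simp]
    cases hpar : ((pyBinNat integer.natAbs).count '1' % 2 == 1) with
    | true => rw [if_pos rfl, if_pos rfl]
    | false =>
      simp only [Bool.false_eq_true, if_false]
      exact decode_core_neg _ hb (pyBinNat_ne_nil _)
  · simp only [hneg, if_false]
    cases hpar : ((pyBinNat integer.natAbs).count '1' % 2 == 1) with
    | true => rw [if_pos rfl, if_pos rfl]
    | false =>
      simp only [Bool.false_eq_true, if_false]
      exact decode_core _ hb
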